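-- pv_equiv track=rewrite | github.com/yilunc/NP_Solver | tester.py | choose_path_with_max_score
-- ===== SOURCE A (Python) =====
-- def choose_path_with_max_score(paths, scores):
-- 	"""
-- 	A function that takes in the set of all paths, assigns scores to the paths
-- 	and then chooses the path with the maximum score.
-- 	INPUT A set of all the possible paths
-- 	OUTPUT The path with the maximum score
--
-- 	Doctests
-- 	>>> paths = [(1,2),(3,)]
-- 	>>> scores = {1 : 10, 2: 10, 3: 10}
-- 	>>> choose_path_with_max_score(paths, scores)
-- 	(1, 2)
--
-- 	"""
-- 	# raise NotImplementedError()
-- 	paths_to_scores = dict() #ensure paths are tuples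
-- 	for path in paths:
-- 		# print "The path: ", type(path)
-- 		path_score = 0
-- 		for h in path:
-- 			path_score += scores[h]
-- 		paths_to_scores[path] = path_score
--
-- 	max_path = None
-- 	max_score = 0
-- 	for el in paths_to_scores.keys():
-- 		if(paths_to_scores[el] > max_score):
-- 			max_score = paths_to_scores[el]
-- 			max_path = el
--
-- 	return max_path
-- ===== SOURCE B (Python) =====
-- def choose_path_with_max_score(paths, scores):
--     max_path = None
--     max_score = 0
--     for path in paths:
--         path_score = 0
--         for h in path:
--             path_score += scores[h]
--         if path_score > max_score:
--             max_score = path_score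
--             max_path = path
--     return max_path
-- ===== Notes on version B (the rewrite author's own statement) =====
-- stated objective: simpler
-- what changed: Fused A's two passes into one direct scan with a running (max_path, max_score) accumulator, eliminating the intermediate paths_to_scores dict entirely.
import Mathlib
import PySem

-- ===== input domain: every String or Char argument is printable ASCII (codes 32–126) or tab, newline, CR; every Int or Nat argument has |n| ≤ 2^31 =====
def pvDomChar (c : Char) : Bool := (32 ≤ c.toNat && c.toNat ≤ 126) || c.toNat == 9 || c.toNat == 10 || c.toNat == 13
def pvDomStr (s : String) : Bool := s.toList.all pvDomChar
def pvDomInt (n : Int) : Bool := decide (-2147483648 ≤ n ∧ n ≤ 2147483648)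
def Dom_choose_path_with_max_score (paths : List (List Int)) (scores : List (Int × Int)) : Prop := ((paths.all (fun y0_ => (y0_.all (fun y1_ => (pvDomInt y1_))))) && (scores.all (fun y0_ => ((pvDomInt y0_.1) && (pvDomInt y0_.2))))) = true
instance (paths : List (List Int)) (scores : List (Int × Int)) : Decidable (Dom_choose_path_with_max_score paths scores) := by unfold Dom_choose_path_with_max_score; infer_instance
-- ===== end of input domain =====

-- B fuses A's two passes (score dict build + key scan) into one direct scan with a running
-- (max_path, max_score) accumulator; same results, the intermediate dict disappears (objective: simpler).

-- ===== PORT A =====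
-- A, literally: build paths_to_scores : dict, then scan its keys with max_score=0 / max_path=None and strict >.
def choose_path_with_max_score (paths : List (List Int)) (scores : List (Int × Int)) : Option (List Int) :=
  let sd : PySem.Dict Int Int := PySem.Dict.mk scores
  let paths_to_scores : PySem.Dict (List Int) Int :=
    paths.foldl (fun d path => d.insert path (path.foldl (fun s h => s + sd.getD h 0) 0)) PySem.Dict.empty
  let r := paths_to_scores.keys.foldl
    (fun (st : Option (List Int) × Int) el =>
      if paths_to_scores.getD el 0 > st.2 then (some el, paths_to_scores.getD el 0) else st)
    (none, 0)
  r.1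

-- ===== PORT B =====
-- B, literally: one pass over paths, scoring each path and updating the accumulator in place.
def choose_path_with_max_score_alt (paths : List (List Int)) (scores : List (Int × Int)) : Option (List Int) :=
  (paths.foldl
    (fun (st : Option (List Int) × Int) path =>
      let path_score := path.foldl (fun s h => s + (PySem.Dict.mk scores).getD h 0) 0
      if path_score > st.2 then (some path, path_score) else st)
    (none, 0)).1

-- ===== PRECONDITION & SPEC =====
-- Pre_ excludes exactly the inputs where Python raises KeyError: some path element that is not a key of scores.
def Pre_choose_path_with_max_score (paths : List (List Int)) (scores : List (Int × Int)) : Prop :=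
  ∀ path ∈ paths, ∀ h ∈ path, h ∈ scores.map Prod.fst
instance (paths : List (List Int)) (scores : List (Int × Int)) : Decidable (Pre_choose_path_with_max_score paths scores) := by unfold Pre_choose_path_with_max_score; infer_instance

def pvWitness_choose_path_with_max_score : List (List Int) × (List (Int × Int)) :=
  ([[1, 2], [3]], [(1, 10), (2, 10), (3, 10)])

def Spec_choose_path_with_max_score (paths : List (List Int)) (scores : List (Int × Int)) (out : Option (List Int)) : Prop := out = choose_path_with_max_score_alt paths scores
instance (paths : List (List Int)) (scores : List (Int × Int)) (out : Option (List Int)) : Decidable (Spec_choose_path_with_max_score paths scores out) := by unfold Spec_choose_path_with_max_score; infer_instance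

-- ===== CLAIM (what is proved, stated in full; the proofs are below) =====
def Claim_equal_choose_path_with_max_score : Prop := ∀ (paths : List (List Int)) (scores : List (Int × Int)), Dom_choose_path_with_max_score paths scores → Pre_choose_path_with_max_score paths scores → Spec_choose_path_with_max_score paths scores (choose_path_with_max_score paths scores)

-- ===== LEMMAS AND PROOFS =====

-- the shared loop step, as a proof-side abbreviation (both ports' inner if)
def pvStep (g : List Int → Int) (st : Option (List Int) × Int) (x : List Int) : Option (List Int) × Int :=
  if g x > st.2 then (some x, g x) else st

theorem pvStep_snd_le (g : List Int → Int) (st : Option (List Int) × Int) (x : List Int) :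
    st.2 ≤ (pvStep g st x).2 := by
  unfold pvStep; split_ifs with h
  · simp; omega
  · simp

theorem pvStep_snd_ge (g : List Int → Int) (st : Option (List Int) × Int) (x : List Int) :
    g x ≤ (pvStep g st x).2 := by
  unfold pvStep; split_ifs with h
  · simp
  · simpa using not_lt.1 h

-- once st.2 already dominates g x, occurrences of x in the rest of the loop are no-ops
theorem pvFoldl_skip (g : List Int → Int) (l : List (List Int)) :
    ∀ (st : Option (List Int) × Int) (x : List Int), g x ≤ st.2 →
      l.foldl (pvStep g) st = (l.filter (fun y => !(y == x))).foldl (pvStep g) st := by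
  induction l with
  | nil => intro st x _; simp
  | cons y ys ih =>
    intro st x hx
    by_cases hyx : y = x
    · subst hyx
      have hstep : pvStep g st y = st := by unfold pvStep; split_ifs with h <;> [omega; rfl]
      simp [List.filter, hstep, ih st y hx]
    · have : (y == x) = false := by simp [hyx]
      simp only [List.foldl_cons, List.filter_cons, this, Bool.not_false, if_pos]
      exact ih (pvStep g st y) x (le_trans hx (pvStep_snd_le g st y))

-- ofList commutes with filter (first-occurrence dedup of a filtered list)
theorem pvOfList_filter (p : List Int → Bool) (l : List (List Int)) :
    (PySem.Set.ofList l).filter p = PySem.Set.ofList (l.filter p) := by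
  induction l with
  | nil => simp [PySem.Set.ofList_nil]
  | cons x xs ih =>
    by_cases hp : p x = true
    · simp [PySem.Set.ofList_cons, hp, PySem.Set.discard, List.filter_filter, ← ih]
      congr 1
      funext y; cases hxy : (y == x) <;> simp
    · simp [PySem.Set.ofList_cons, hp, PySem.Set.discard, List.filter_filter, ← ih]
      apply List.filter_congr
      intro y _
      cases hxy : (y == x)
      · simp
      · simp at hxy; subst hxy; simp [hp]

-- folding the max-step over the deduplicated list equals folding over the raw list
theorem pvFoldl_ofList (g : List Int → Int) (l : List (List Int)) :
    ∀ (st : Option (List Int) × Int),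
      (PySem.Set.ofList l).foldl (pvStep g) st = l.foldl (pvStep g) st := by
  induction hn : l.length using Nat.strong_induction_on generalizing l with
  | _ n ih =>
    match l with
    | [] => intro st; simp [PySem.Set.ofList_nil]
    | x :: xs =>
      intro st
      rw [PySem.Set.ofList_cons]
      have hdisc : (PySem.Set.ofList xs).discard x = PySem.Set.ofList (xs.filter (fun y => !(y == x))) := by
        rw [← pvOfList_filter]; simp [PySem.Set.discard]
      rw [List.foldl_cons, hdisc,
        ih (xs.filter (fun y => !(y == x))).length (by
          subst hn; simpa using Nat.lt_succ_of_le (List.length_filter_le _ xs)) _ rfl,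
        List.foldl_cons,
        pvFoldl_skip g xs (pvStep g st x) x (pvStep_snd_ge g st x)]

-- the dict built by A maps each inserted path to g path
theorem pvDictGetD (g : List Int → Int) (l : List (List Int)) :
    ∀ (d : PySem.Dict (List Int) Int) (el : List Int),
      (l.foldl (fun d p => d.insert p (g p)) d).getD el 0
        = if el ∈ l then g el else d.getD el 0 := by
  induction l with
  | nil => intro d el; simp
  | cons x xs ih =>
    intro d el
    rw [List.foldl_cons, ih]
    by_cases hmem : el ∈ xs
    · simp [hmem]
    · simp [hmem, PySem.Dict.getD_insert]
      by_cases hex : el = x <;> simp [hex]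

-- ===== VERDICT (by name: the statement is the Claim_ definition above) =====
theorem choose_path_with_max_score_spec : Claim_equal_choose_path_with_max_score := by
  intro paths scores _ _
  unfold Spec_choose_path_with_max_score choose_path_with_max_score choose_path_with_max_score_alt
  set g : List Int → Int :=
    fun path => path.foldl (fun s h => s + (PySem.Dict.mk scores).getD h 0) 0 with hg
  have hkeys : (paths.foldl (fun d p => d.insert p (g p)) PySem.Dict.empty).keys
      = PySem.Set.ofList paths := by
    rw [PySem.Dict.keys_foldl_insert (f := fun _ p => g p)]
    simp [PySem.Set.update_nil_left]
  simp only []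
  rw [hkeys]
  have hcong : (PySem.Set.ofList paths).foldl
      (fun (st : Option (List Int) × Int) el =>
        if (paths.foldl (fun d p => d.insert p (g p)) PySem.Dict.empty).getD el 0 > st.2
        then (some el, (paths.foldl (fun d p => d.insert p (g p)) PySem.Dict.empty).getD el 0)
        else st) (none, 0)
      = (PySem.Set.ofList paths).foldl (pvStep g) (none, 0) := by
    apply PySem.List.foldl_congr_mem
    intro acc x hx
    have hxp : x ∈ paths := (PySem.Set.mem_ofList paths x).1 hx
    rw [pvDictGetD g paths PySem.Dict.empty x, if_pos hxp]
    rfl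
  rw [hcong, pvFoldl_ofList g paths (none, 0)]
  rfl
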